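-- pv_equiv track=rewrite | github.com/Reinsdyret/uib-notes | INF100/Oppgaver/uke9/uke_09_oppg_7.py | word_comparison
-- ===== SOURCE A (Python) =====
-- def word_comparison(word1,word2:str) -> dict:
--     """Takes in two strings and returns the common letters
--     and unique letters for each word in a dictonary"""
--     the_dictionary = {
--             "In common": None,
--             "Unique to first word": None,
--             "Unique to second word": None,
--     }
--     # For first word
--     common = []
--     unique1 = []
--     for letter1 in word1:
--         if letter1 in word2:
--             common.append(letter1)
--             continue
--         unique1.append(letter1)
--
--
--     unique2 = []
--     for letter1 in word2:
--         if letter1 in word1: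
--             common.append(letter1)
--             continue
--         unique2.append(letter1)
--
--     the_dictionary["In common"] = set(common)
--     the_dictionary["Unique to first word"] = set(unique1)
--     the_dictionary["Unique to second word"] = set(unique2)
--
--     return the_dictionary
-- ===== SOURCE B (Python) =====
-- def word_comparison(word1, word2: str) -> dict:
--     """Takes in two strings and returns the common letters
--     and unique letters for each word in a dictonary"""
--     # one flag table: bit 1 = occurs in word1, bit 2 = occurs in word2
--     flags = {}
--     for letter in word1:
--         flags[letter] = flags.get(letter, 0) | 1
--     for letter in word2:
--         flags[letter] = flags.get(letter, 0) | 2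
--     common = []
--     unique1 = []
--     unique2 = []
--     for letter, flag in flags.items():
--         if flag == 3:
--             common.append(letter)
--         elif flag == 1:
--             unique1.append(letter)
--         else:
--             unique2.append(letter)
--     return {
--         "In common": set(common),
--         "Unique to first word": set(unique1),
--         "Unique to second word": set(unique2),
--     }
-- ===== Notes on version B (the rewrite author's own statement) =====
-- stated objective: alternative
-- what changed: Replaces A's two per-word membership-scan loops with separate append lists by a single letter->bit-flag table (bit 1 = in word1, bit 2 = in word2) built in two passes and one classification pass over the table's items.
import Mathlib
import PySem

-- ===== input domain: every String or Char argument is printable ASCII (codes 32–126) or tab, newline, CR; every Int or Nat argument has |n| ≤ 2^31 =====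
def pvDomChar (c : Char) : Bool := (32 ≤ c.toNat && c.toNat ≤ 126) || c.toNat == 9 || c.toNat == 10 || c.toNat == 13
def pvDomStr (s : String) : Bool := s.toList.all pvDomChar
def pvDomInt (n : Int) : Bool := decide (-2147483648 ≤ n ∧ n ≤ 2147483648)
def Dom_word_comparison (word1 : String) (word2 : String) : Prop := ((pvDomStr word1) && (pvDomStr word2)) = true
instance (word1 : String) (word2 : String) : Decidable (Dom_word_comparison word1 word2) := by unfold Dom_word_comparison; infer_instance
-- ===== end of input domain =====

-- B replaces A's two per-word membership-scan loops by a single letter→bit-flag table built in two passes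
-- plus one classification pass over its items (alternative decomposition; return value proved equal).


-- ===== PORT A =====
-- letters of a Python string are its one-character substrings: 'letter1 in word2' is
-- PySem.Str.isIn (String.ofList [c]) word2 (exact substring test)
def word_comparison (word1 : String) (word2 : String) : List (String × List String) :=
  -- first loop: common and unique1 grow together, so the state is the pair (common, unique1)
  let cu1 := word1.toList.foldl
    (fun (t : List String × List String) c =>
      if PySem.Str.isIn (String.ofList [c]) word2 then (t.1 ++ [String.ofList [c]], t.2)
      else (t.1, t.2 ++ [String.ofList [c]])) ([], [])
  -- second loop keeps appending to common, builds unique2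
  let cu2 := word2.toList.foldl
    (fun (t : List String × List String) c =>
      if PySem.Str.isIn (String.ofList [c]) word1 then (t.1 ++ [String.ofList [c]], t.2)
      else (t.1, t.2 ++ [String.ofList [c]])) (cu1.1, [])
  [("In common", PySem.Set.ofList cu2.1),
   ("Unique to first word", PySem.Set.ofList cu1.2),
   ("Unique to second word", PySem.Set.ofList cu2.2)]

-- ===== PORT B =====
def word_comparison_alt (word1 : String) (word2 : String) : List (String × List String) :=
  let flags1 := word1.toList.foldl
    (fun (d : PySem.Dict String Int) c =>
      d.insert (String.ofList [c]) (PySem.Int.bor (d.getD (String.ofList [c]) 0) 1)) PySem.Dict.empty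
  let flags := word2.toList.foldl
    (fun (d : PySem.Dict String Int) c =>
      d.insert (String.ofList [c]) (PySem.Int.bor (d.getD (String.ofList [c]) 0) 2)) flags1
  let t := flags.items.foldl
    (fun (t : List String × List String × List String) p =>
      if p.2 == 3 then (t.1 ++ [p.1], t.2.1, t.2.2)
      else if p.2 == 1 then (t.1, t.2.1 ++ [p.1], t.2.2)
      else (t.1, t.2.1, t.2.2 ++ [p.1])) ([], [], [])
  [("In common", PySem.Set.ofList t.1),
   ("Unique to first word", PySem.Set.ofList t.2.1),
   ("Unique to second word", PySem.Set.ofList t.2.2)]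

-- ===== PRECONDITION & SPEC =====
def Spec_word_comparison (word1 : String) (word2 : String) (out : List (String × List String)) : Prop := out = word_comparison_alt word1 word2
instance (word1 : String) (word2 : String) (out : List (String × List String)) : Decidable (Spec_word_comparison word1 word2 out) := by unfold Spec_word_comparison; infer_instance

-- ===== CLAIM (what is proved, stated in full; the proofs are below) =====
def Claim_equal_word_comparison : Prop := ∀ (word1 : String) (word2 : String), Dom_word_comparison word1 word2 → Spec_word_comparison word1 word2 (word_comparison word1 word2)

-- ===== LEMMAS AND PROOFS =====
def pvTs (c : Char) : String := String.ofList [c]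

theorem pvTs_def (c : Char) : String.ofList [c] = pvTs c := rfl

def pvFlag (l1 l2 : List String) (k : String) : Int :=
  (if k ∈ l1 then 1 else 0) + (if k ∈ l2 then 2 else 0)

theorem pvTs_inj : Function.Injective pvTs := by
  intro a b h
  have := congrArg String.toList h
  simpa [pvTs] using this

theorem isIn_singleton (c : Char) (s : String) :
    PySem.Str.isIn (pvTs c) s = decide (c ∈ s.toList) := by
  show PySem.Str.isIn (String.ofList [c]) s = decide (c ∈ s.toList)
  by_cases h : c ∈ s.toList
  · simp only [h, decide_true]
    rw [PySem.Str.isIn_iff_infix]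
    obtain ⟨pre, suf, he⟩ := List.mem_iff_append.1 h
    rw [he]
    exact ⟨pre, suf, by simp⟩
  · simp only [h, decide_false]
    rw [← Bool.not_eq_true, PySem.Str.isIn_iff_infix]
    intro hin
    exact h (by simpa using hin.subset (by simp : c ∈ (String.ofList [c]).toList))

theorem pairFold (p : Char → Bool) (w : List Char) (a b : List String) :
    w.foldl (fun (t : List String × List String) c =>
        if p c then (t.1 ++ [pvTs c], t.2) else (t.1, t.2 ++ [pvTs c])) (a, b)
      = (a ++ (w.filter p).map pvTs, b ++ (w.filter (fun c => !p c)).map pvTs) := by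
  induction w generalizing a b with
  | nil => simp
  | cons c w ih => cases hp : p c <;> simp [hp, ih]

theorem map_filter_mem (w v : List Char) :
    (w.filter (fun c => decide (c ∈ v))).map pvTs
      = (w.map pvTs).filter (fun s => decide (s ∈ v.map pvTs)) := by
  induction w with
  | nil => rfl
  | cons c w ih =>
    by_cases h : c ∈ v
    · have h' : ∃ a ∈ v, pvTs a = pvTs c := ⟨c, h, rfl⟩
      simp [List.filter_cons, h, h', ih]
    · have h' : ∀ x ∈ v, ¬ pvTs x = pvTs c := fun x hx hpv => h (pvTs_inj hpv ▸ hx)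
      simp [List.filter_cons, h, ih]
      exact h'

theorem map_filter_not_mem (w v : List Char) :
    (w.filter (fun c => !decide (c ∈ v))).map pvTs
      = (w.map pvTs).filter (fun s => !decide (s ∈ v.map pvTs)) := by
  induction w with
  | nil => rfl
  | cons c w ih =>
    by_cases h : c ∈ v
    · have h' : ∃ a ∈ v, pvTs a = pvTs c := ⟨c, h, rfl⟩
      simp [List.filter_cons, h, h', ih]
    · have h' : ∀ x ∈ v, ¬ pvTs x = pvTs c := fun x hx hpv => h (pvTs_inj hpv ▸ hx)
      simp [List.filter_cons, h, ih]
      exact h'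

theorem set_contains_iff (l : List String) (y : String) :
    (PySem.Set.ofList l).contains y = decide (y ∈ l) := by
  by_cases h : y ∈ l <;>
    simp [PySem.Set.contains, PySem.Set.mem_ofList, h]

theorem ofList_filter (p : String → Bool) (l : List String) :
    PySem.Set.ofList (l.filter p) = (PySem.Set.ofList l).filter p := by
  induction l with
  | nil => simp
  | cons x l ih =>
    by_cases hp : p x
    · rw [List.filter_cons_of_pos hp, PySem.Set.ofList_cons, PySem.Set.ofList_cons, ih]
      simp only [PySem.Set.discard, List.filter_cons_of_pos hp, List.filter_filter]
      congr 1
      apply List.filter_congr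
      intro y _
      exact Bool.and_comm _ _
    · rw [List.filter_cons_of_neg hp, PySem.Set.ofList_cons, ih]
      simp only [PySem.Set.discard, List.filter_cons_of_neg hp, List.filter_filter]
      apply List.filter_congr
      intro y _
      by_cases hy : y = x
      · subst hy; simp [hp]
      · simp [hy]

theorem loop1 (w : List Char) :
    (w.foldl (fun (d : PySem.Dict String Int) c =>
        d.insert (pvTs c) (PySem.Int.bor (d.getD (pvTs c) 0) 1)) PySem.Dict.empty).items
      = (PySem.Set.ofList (w.map pvTs)).map (fun k => (k, (1 : Int))) := by
  induction w using List.reverseRecOn with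
  | nil => simp [PySem.Dict.empty]
  | append_singleton w c ih =>
    rw [List.foldl_append, List.foldl_cons, List.foldl_nil]
    set d := w.foldl (fun (d : PySem.Dict String Int) c =>
        d.insert (pvTs c) (PySem.Int.bor (d.getD (pvTs c) 0) 1)) PySem.Dict.empty with hdd
    have hkeys : d.keys = PySem.Set.ofList (w.map pvTs) := by
      simp [PySem.Dict.keys, ih, List.map_map, Function.comp_def]
    have hnodup : d.keys.Nodup := by rw [hkeys]; exact PySem.Set.nodup_ofList _
    rw [List.map_append, List.map_cons, List.map_nil, PySem.Set.ofList_append_singleton]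
    by_cases hc : pvTs c ∈ PySem.Set.ofList (w.map pvTs)
    · have hcm : pvTs c ∈ List.map pvTs w := (PySem.Set.mem_ofList _ _).1 hc
      have hcont : d.contains (pvTs c) = true := by
        rw [PySem.Dict.contains_eq_decide_mem_keys, hkeys]; exact decide_eq_true hc
      have hmem : (pvTs c, (1 : Int)) ∈ d.items := by
        rw [ih]; exact List.mem_map_of_mem hc
      have hget : d.getD (pvTs c) 0 = 1 := PySem.Dict.getD_of_mem_items d hmem hnodup 0
      have hb : PySem.Int.bor (1 : Int) 1 = 1 := by decide
      rw [hget, hb, PySem.Dict.items_insert_of_contains _ _ hcont, ih]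
      have hadd : PySem.Set.add (PySem.Set.ofList (w.map pvTs)) (pvTs c)
          = PySem.Set.ofList (w.map pvTs) := by
        simp [PySem.Set.add, PySem.Set.contains, hcm]
      rw [hadd, List.map_map]
      apply List.map_congr_left
      intro k _
      by_cases hk : k = pvTs c
      · subst hk; simp
      · simp [Function.comp_def, hk]
    · have hcm : pvTs c ∉ List.map pvTs w := fun hx => hc ((PySem.Set.mem_ofList _ _).2 hx)
      have hcont : d.contains (pvTs c) = false := by
        rw [PySem.Dict.contains_eq_decide_mem_keys, hkeys]; exact decide_eq_false hc
      have hget : d.getD (pvTs c) 0 = 0 := PySem.Dict.getD_of_not_contains d 0 hcont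
      have hb : PySem.Int.bor (0 : Int) 1 = 1 := by decide
      rw [hget, hb, PySem.Dict.items_insert_of_not_contains _ _ hcont, ih]
      have hadd : PySem.Set.add (PySem.Set.ofList (w.map pvTs)) (pvTs c)
          = PySem.Set.ofList (w.map pvTs) ++ [pvTs c] := by
        simp [PySem.Set.add, PySem.Set.contains, hcm]
      rw [hadd, List.map_append]
      norm_num

theorem loop2 (w : List Char) (S : List String) (g : String → Int)
    (hg : ∀ k, g k = 1 ∨ g k = 2 ∨ g k = 3) (hS : S.Nodup)
    (d : PySem.Dict String Int) (hd : d.items = S.map (fun k => (k, g k))) :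
    (w.foldl (fun (d : PySem.Dict String Int) c =>
        d.insert (pvTs c) (PySem.Int.bor (d.getD (pvTs c) 0) 2)) d).items
      = (PySem.Set.update S (w.map pvTs)).map
          (fun k => (k, if k ∈ w.map pvTs then PySem.Int.bor (if k ∈ S then g k else 0) 2 else g k)) := by
  induction w generalizing S g d with
  | nil => simpa [PySem.Set.update_nil] using hd
  | cons c w ih =>
    rw [List.foldl_cons, List.map_cons, PySem.Set.update_cons]
    have hkeys : d.keys = S := by
      simp [PySem.Dict.keys, hd, List.map_map, Function.comp_def]
    by_cases hc : pvTs c ∈ S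
    · have hcont : d.contains (pvTs c) = true := by
        rw [PySem.Dict.contains_eq_decide_mem_keys, hkeys]; exact decide_eq_true hc
      have hmem : (pvTs c, g (pvTs c)) ∈ d.items := by
        rw [hd]; exact List.mem_map_of_mem hc
      have hget : d.getD (pvTs c) 0 = g (pvTs c) := PySem.Dict.getD_of_mem_items d hmem (hkeys ▸ hS) 0
      have hadd : PySem.Set.add S (pvTs c) = S := by
        simp [PySem.Set.add, PySem.Set.contains, hc]
      have hd' : (d.insert (pvTs c) (PySem.Int.bor (d.getD (pvTs c) 0) 2)).items
          = S.map (fun k => (k, if k = pvTs c then PySem.Int.bor (g (pvTs c)) 2 else g k)) := by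
        rw [PySem.Dict.items_insert_of_contains _ _ hcont, hd, hget, List.map_map]
        apply List.map_congr_left
        intro k _
        by_cases hk : k = pvTs c
        · subst hk; simp
        · simp [Function.comp_def, hk]
      have hg' : ∀ k, (if k = pvTs c then PySem.Int.bor (g (pvTs c)) 2 else g k) = 1
          ∨ (if k = pvTs c then PySem.Int.bor (g (pvTs c)) 2 else g k) = 2
          ∨ (if k = pvTs c then PySem.Int.bor (g (pvTs c)) 2 else g k) = 3 := by
        intro k
        by_cases hk : k = pvTs c
        · rcases hg (pvTs c) with h | h | h <;> simp [hk, h] <;> decide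
        · simpa [hk] using hg k
      rw [hadd, ih S _ hg' hS _ hd']
      apply List.map_congr_left
      intro k _
      by_cases hk : k = pvTs c
      · subst hk
        by_cases hkw : pvTs c ∈ List.map pvTs w
        · rcases hg (pvTs c) with h | h | h <;>
            simp [hkw, hc, h, List.mem_cons] <;> decide
        · rcases hg (pvTs c) with h | h | h <;>
            simp [hkw, hc, h, List.mem_cons] <;> decide
      · simp [hk, List.mem_cons]
    · have hcont : d.contains (pvTs c) = false := by
        rw [PySem.Dict.contains_eq_decide_mem_keys, hkeys]; exact decide_eq_false hc
      have hget : d.getD (pvTs c) 0 = 0 := PySem.Dict.getD_of_not_contains d 0 hcont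
      have hb : PySem.Int.bor (0 : Int) 2 = 2 := by decide
      have hadd : PySem.Set.add S (pvTs c) = S ++ [pvTs c] := by
        simp [PySem.Set.add, PySem.Set.contains, hc]
      have hS' : (S ++ [pvTs c]).Nodup := by
        have := PySem.Set.nodup_add S (pvTs c) hS
        rwa [hadd] at this
      have hd' : (d.insert (pvTs c) (PySem.Int.bor (d.getD (pvTs c) 0) 2)).items
          = (S ++ [pvTs c]).map (fun k => (k, if k = pvTs c then (2 : Int) else g k)) := by
        rw [PySem.Dict.items_insert_of_not_contains _ _ hcont, hd, hget, hb, List.map_append]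
        congr 1
        · apply List.map_congr_left
          intro k hk
          have hkc : ¬ k = pvTs c := fun h => hc (h ▸ hk)
          simp [hkc]
        · simp
      have hg' : ∀ k, (if k = pvTs c then (2 : Int) else g k) = 1
          ∨ (if k = pvTs c then (2 : Int) else g k) = 2
          ∨ (if k = pvTs c then (2 : Int) else g k) = 3 := by
        intro k
        by_cases hk : k = pvTs c
        · simp [hk]
        · simpa [hk] using hg k
      rw [hadd, ih (S ++ [pvTs c]) _ hg' hS' _ hd']
      apply List.map_congr_left
      intro k _
      by_cases hk : k = pvTs c
      · subst hk
        by_cases hkw : pvTs c ∈ List.map pvTs w <;>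
          simp [hkw, hc, List.mem_cons, List.mem_append] <;> decide
      · simp [hk, List.mem_cons, List.mem_append]

theorem items_flags (w1 w2 : List Char) :
    (w2.foldl (fun (d : PySem.Dict String Int) c =>
        d.insert (pvTs c) (PySem.Int.bor (d.getD (pvTs c) 0) 2))
      (w1.foldl (fun (d : PySem.Dict String Int) c =>
        d.insert (pvTs c) (PySem.Int.bor (d.getD (pvTs c) 0) 1)) PySem.Dict.empty)).items
      = (PySem.Set.ofList (List.map pvTs w1 ++ List.map pvTs w2)).map
          (fun k => (k, pvFlag (List.map pvTs w1) (List.map pvTs w2) k)) := by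
  rw [loop2 w2 (PySem.Set.ofList (List.map pvTs w1)) (fun _ => (1 : Int))
      (fun _ => Or.inl rfl) (PySem.Set.nodup_ofList _) _ (loop1 w1),
    PySem.Set.ofList_append]
  apply List.map_congr_left
  intro k hk
  have hk' : k ∈ List.map pvTs w1 ∨ k ∈ List.map pvTs w2 := by
    have hmem : k ∈ PySem.Set.ofList (List.map pvTs w1 ++ List.map pvTs w2) := by
      rw [PySem.Set.ofList_append]; exact hk
    simpa [List.mem_append] using (PySem.Set.mem_ofList _ _).1 hmem
  have hmem1 : (k ∈ PySem.Set.ofList (List.map pvTs w1)) ↔ k ∈ List.map pvTs w1 :=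
    PySem.Set.mem_ofList _ _
  by_cases h2 : k ∈ List.map pvTs w2
  · by_cases h1 : k ∈ List.map pvTs w1 <;> simp [pvFlag, h1, h2, hmem1] <;> decide
  · have h1 : k ∈ List.map pvTs w1 := hk'.resolve_right h2
    simp [pvFlag, h1, h2]

theorem tripleFold (l : List (String × Int)) (a b c : List String) :
    l.foldl (fun (t : List String × List String × List String) p =>
        if p.2 == 3 then (t.1 ++ [p.1], t.2.1, t.2.2)
        else if p.2 == 1 then (t.1, t.2.1 ++ [p.1], t.2.2)
        else (t.1, t.2.1, t.2.2 ++ [p.1])) (a, b, c)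
      = (a ++ ((l.filter (fun p => p.2 == 3)).map (·.1)),
         b ++ ((l.filter (fun p => p.2 == 1)).map (·.1)),
         c ++ ((l.filter (fun p => !(p.2 == 3) && !(p.2 == 1))).map (·.1))) := by
  induction l generalizing a b c with
  | nil => simp
  | cons p l ih =>
    obtain ⟨k, v⟩ := p
    rw [List.foldl_cons]
    by_cases h3 : v = 3
    · have hcond : (((k, v).2 == (3 : Int)) = true) := by simp [h3]
      rw [if_pos hcond, ih]
      simp [List.filter_cons, h3]
    · have hcond3 : ¬ (((k, v).2 == (3 : Int)) = true) := by simp [h3]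
      rw [if_neg hcond3]
      by_cases h1 : v = 1
      · have hcond1 : (((k, v).2 == (1 : Int)) = true) := by simp [h1]
        rw [if_pos hcond1, ih]
        simp [List.filter_cons, h3, h1]
      · have hcond1 : ¬ (((k, v).2 == (1 : Int)) = true) := by simp [h1]
        rw [if_neg hcond1, ih]
        simp [List.filter_cons, h3, h1]

theorem filter_map_pair (g : String → Int) (S : List String) (q : Int → Bool) :
    ((S.map (fun k => (k, g k))).filter (fun p => q p.2)).map (·.1)
      = S.filter (fun k => q (g k)) := by
  induction S with
  | nil => rfl
  | cons x S ih => by_cases h : q (g x) <;> simp [List.filter_cons, h, ih]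

theorem filter_map_pair3 (g : String → Int) (S : List String) :
    ((S.map (fun k => (k, g k))).filter (fun p => p.2 == 3)).map (·.1)
      = S.filter (fun k => g k == 3) :=
  filter_map_pair g S (fun v => v == 3)

theorem filter_map_pair1 (g : String → Int) (S : List String) :
    ((S.map (fun k => (k, g k))).filter (fun p => p.2 == 1)).map (·.1)
      = S.filter (fun k => g k == 1) :=
  filter_map_pair g S (fun v => v == 1)

theorem filter_map_pair2 (g : String → Int) (S : List String) :
    ((S.map (fun k => (k, g k))).filter (fun p => !(p.2 == 3) && !(p.2 == 1))).map (·.1)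
      = S.filter (fun k => !(g k == 3) && !(g k == 1)) :=
  filter_map_pair g S (fun v => !(v == 3) && !(v == 1))

theorem part2_eq (l1 l2 : List String) :
    PySem.Set.ofList (l1 ++ l2)
      = PySem.Set.ofList l1 ++ (PySem.Set.ofList l2).filter (fun y => !decide (y ∈ l1)) := by
  rw [PySem.Set.ofList_append, PySem.Set.update_eq_append_filter]
  congr 1
  apply List.filter_congr
  intro y _
  simp [set_contains_iff]

theorem flag3 (l1 l2 : List String) (k : String) (h1 : k ∈ l1) :
    (pvFlag l1 l2 k == 3) = decide (k ∈ l2) := by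
  by_cases h2 : k ∈ l2 <;> simp [pvFlag, h1, h2, beq_iff_eq]

theorem flag1 (l1 l2 : List String) (k : String) (h1 : k ∈ l1) :
    (pvFlag l1 l2 k == 1) = !decide (k ∈ l2) := by
  by_cases h2 : k ∈ l2 <;> simp [pvFlag, h1, h2, beq_iff_eq]

theorem flag_out1 (l1 l2 : List String) (k : String) (h1 : k ∉ l1) (h2 : k ∈ l2) :
    pvFlag l1 l2 k = 2 := by simp [pvFlag, h1, h2]

theorem comp1 (l1 l2 : List String) :
    PySem.Set.ofList (l1.filter (fun s => decide (s ∈ l2)) ++ l2.filter (fun s => decide (s ∈ l1)))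
      = PySem.Set.ofList ((PySem.Set.ofList (l1 ++ l2)).filter (fun k => pvFlag l1 l2 k == 3)) := by
  rw [part2_eq]
  have hnil : (PySem.Set.ofList (l2.filter (fun s => decide (s ∈ l1)))).filter
      (fun y => !decide (y ∈ l1.filter (fun s => decide (s ∈ l2)))) = [] := by
    rw [List.filter_eq_nil_iff]
    intro a ha
    have ha' : a ∈ l2 ∧ a ∈ l1 := by
      have := (PySem.Set.mem_ofList _ _).1 ha
      simpa using this
    simp [List.mem_filter, ha'.1, ha'.2]
  rw [hnil, List.append_nil, ofList_filter, part2_eq l1 l2, List.filter_append]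
  have h1 : (PySem.Set.ofList l1).filter (fun k => pvFlag l1 l2 k == 3)
      = (PySem.Set.ofList l1).filter (fun s => decide (s ∈ l2)) := by
    apply List.filter_congr
    intro k hk
    exact flag3 l1 l2 k ((PySem.Set.mem_ofList _ _).1 hk)
  have h2 : ((PySem.Set.ofList l2).filter (fun y => !decide (y ∈ l1))).filter
      (fun k => pvFlag l1 l2 k == 3) = [] := by
    rw [List.filter_eq_nil_iff]
    intro a ha
    have hmf := List.mem_filter.1 ha
    have ha2 : a ∈ l2 := (PySem.Set.mem_ofList _ _).1 hmf.1
    have ha1 : a ∉ l1 := by simpa using hmf.2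
    simp [flag_out1 l1 l2 a ha1 ha2, beq_iff_eq]
  rw [h1, h2, List.append_nil,
    PySem.Set.ofList_eq_self_of_nodup _ ((PySem.Set.nodup_ofList _).filter _)]

theorem comp2 (l1 l2 : List String) :
    PySem.Set.ofList (l1.filter (fun s => !decide (s ∈ l2)))
      = PySem.Set.ofList ((PySem.Set.ofList (l1 ++ l2)).filter (fun k => pvFlag l1 l2 k == 1)) := by
  rw [ofList_filter, part2_eq l1 l2, List.filter_append]
  have h1 : (PySem.Set.ofList l1).filter (fun k => pvFlag l1 l2 k == 1)
      = (PySem.Set.ofList l1).filter (fun s => !decide (s ∈ l2)) := by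
    apply List.filter_congr
    intro k hk
    exact flag1 l1 l2 k ((PySem.Set.mem_ofList _ _).1 hk)
  have h2 : ((PySem.Set.ofList l2).filter (fun y => !decide (y ∈ l1))).filter
      (fun k => pvFlag l1 l2 k == 1) = [] := by
    rw [List.filter_eq_nil_iff]
    intro a ha
    have hmf := List.mem_filter.1 ha
    have ha2 : a ∈ l2 := (PySem.Set.mem_ofList _ _).1 hmf.1
    have ha1 : a ∉ l1 := by simpa using hmf.2
    simp [flag_out1 l1 l2 a ha1 ha2, beq_iff_eq]
  rw [h1, h2, List.append_nil,
    PySem.Set.ofList_eq_self_of_nodup _ ((PySem.Set.nodup_ofList _).filter _)]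

theorem comp3 (l1 l2 : List String) :
    PySem.Set.ofList (l2.filter (fun s => !decide (s ∈ l1)))
      = PySem.Set.ofList ((PySem.Set.ofList (l1 ++ l2)).filter
          (fun k => !(pvFlag l1 l2 k == 3) && !(pvFlag l1 l2 k == 1))) := by
  rw [ofList_filter, part2_eq l1 l2, List.filter_append]
  have h1 : (PySem.Set.ofList l1).filter
      (fun k => !(pvFlag l1 l2 k == 3) && !(pvFlag l1 l2 k == 1)) = [] := by
    rw [List.filter_eq_nil_iff]
    intro a ha
    have ha1 : a ∈ l1 := (PySem.Set.mem_ofList _ _).1 ha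
    by_cases h2 : a ∈ l2 <;> simp [flag3 l1 l2 a ha1, flag1 l1 l2 a ha1, h2]
  have h2 : ((PySem.Set.ofList l2).filter (fun y => !decide (y ∈ l1))).filter
      (fun k => !(pvFlag l1 l2 k == 3) && !(pvFlag l1 l2 k == 1))
      = (PySem.Set.ofList l2).filter (fun y => !decide (y ∈ l1)) := by
    apply List.filter_eq_self.2
    intro a ha
    have hmf := List.mem_filter.1 ha
    have ha2 : a ∈ l2 := (PySem.Set.mem_ofList _ _).1 hmf.1
    have ha1 : a ∉ l1 := by simpa using hmf.2
    simp [flag_out1 l1 l2 a ha1 ha2, beq_iff_eq]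
  rw [h1, h2, List.nil_append,
    PySem.Set.ofList_eq_self_of_nodup _ ((PySem.Set.nodup_ofList _).filter _)]

theorem ab_eq (word1 word2 : String) :
    word_comparison word1 word2 = word_comparison_alt word1 word2 := by
  simp only [word_comparison, word_comparison_alt, isIn_singleton, pvTs_def, pairFold,
    List.nil_append]
  rw [items_flags, tripleFold]
  simp only [filter_map_pair3, filter_map_pair1, filter_map_pair2, List.nil_append,
    map_filter_mem, map_filter_not_mem]
  simp only [List.cons.injEq, Prod.mk.injEq, true_and, and_true]
  exact ⟨comp1 _ _, comp2 _ _, comp3 _ _⟩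

-- ===== VERDICT (by name: the statement is the Claim_ definition above) =====
theorem word_comparison_spec : Claim_equal_word_comparison := by
  intro word1 word2 _
  unfold Spec_word_comparison
  exact ab_eq word1 word2
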